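-- pv_equiv track=rewrite | github.com/huynonstop/grinding-leetcode | hackerrank/climbingLeaderboard.py | climbingLeaderboardSet
-- ===== SOURCE A (Python) =====
-- from bisect import bisect_left
--
-- def climbingLeaderboardSet(ranked, player):
--     counts = sorted(set(ranked))
--     n = len(counts)
--     res = []
--     for a in player:
--         i = bisect_left(counts, a)
--         if i < n and counts[i] == a:
--             res.append(n - i)
--         else:
--             res.append(n+1-i)
--     return res
--
-- def bisect_left(arr, k):  # increase
--     l = 0
--     r = len(arr)
--     while l < r:
--         m = (l + r) >> 1
--         if arr[m] < k:
--             l = m + 1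
--         else:
--             r = m
--     return l
-- ===== SOURCE B (Python) =====
-- def climbingLeaderboardSet(ranked, player):
--     # dense rank = 1 + number of distinct leaderboard scores strictly above the player's
--     distinct = set(ranked)
--     return [1 + len([c for c in distinct if c > a]) for a in player]
-- ===== Notes on version B (the rewrite author's own statement) =====
-- stated objective: simpler
-- what changed: B drops the sort and hand-written binary search entirely: the dense rank of a score is 1 plus the number of distinct leaderboard scores strictly greater, computed by a direct count over set(ranked) per player.
import Mathlib
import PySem

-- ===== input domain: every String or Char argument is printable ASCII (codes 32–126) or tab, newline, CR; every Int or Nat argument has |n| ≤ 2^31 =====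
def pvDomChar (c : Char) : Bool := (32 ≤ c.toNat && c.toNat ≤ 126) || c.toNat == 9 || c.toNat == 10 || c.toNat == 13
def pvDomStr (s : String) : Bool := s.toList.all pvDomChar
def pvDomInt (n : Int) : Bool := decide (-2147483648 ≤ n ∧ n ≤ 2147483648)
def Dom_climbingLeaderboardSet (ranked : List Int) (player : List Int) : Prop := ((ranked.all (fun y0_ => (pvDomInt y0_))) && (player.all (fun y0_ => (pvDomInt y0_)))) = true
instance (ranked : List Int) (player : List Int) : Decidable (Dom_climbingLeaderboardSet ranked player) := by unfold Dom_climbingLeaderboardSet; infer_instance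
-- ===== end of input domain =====

-- B replaces A's sort + per-query binary search by a direct count of strictly greater
-- distinct scores (objective: simpler; not faster).

-- ===== PORT A =====
-- A's hand-written bisect_left loop: l, r start at 0 and len(counts) and stay in
-- [0, len]; m = (l+r)>>1 lies in [l, r) whenever l < r, so counts[m] is always an
-- in-range non-negative index and List.getD m 0 is exact there.
def pyBisectLoop (arr : List Int) (k : Int) (l r : Nat) : Nat :=
  if h : l < r then
    let m := (l + r) / 2
    if arr.getD m 0 < k then pyBisectLoop arr k (m + 1) r
    else pyBisectLoop arr k l m
  else l
termination_by r - l
decreasing_by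
  · omega
  · have : (l + r) / 2 < r := by omega
    omega

def climbingLeaderboardSet (ranked : List Int) (player : List Int) : List Int :=
  let counts := PySem.List.sorted (PySem.Set.ofList ranked) (fun x => x)
  let n := counts.length
  player.foldl (fun res a =>
    let i := pyBisectLoop counts a 0 n
    if i < n ∧ counts.getD i 0 = a then res ++ [(n : Int) - i]
    else res ++ [(n : Int) + 1 - i]) []

-- ===== PORT B =====
def climbingLeaderboardSet_alt (ranked : List Int) (player : List Int) : List Int :=
  let distinct := PySem.Set.ofList ranked
  player.map (fun a => 1 + ((distinct.filter (fun c => decide (a < c))).length : Int))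

-- ===== PRECONDITION & SPEC =====
def Spec_climbingLeaderboardSet (ranked : List Int) (player : List Int) (out : List Int) : Prop := out = climbingLeaderboardSet_alt ranked player
instance (ranked : List Int) (player : List Int) (out : List Int) : Decidable (Spec_climbingLeaderboardSet ranked player out) := by unfold Spec_climbingLeaderboardSet; infer_instance

-- ===== CLAIM (what is proved, stated in full; the proofs are below) =====
def Claim_equal_climbingLeaderboardSet : Prop := ∀ (ranked : List Int) (player : List Int), Dom_climbingLeaderboardSet ranked player → Spec_climbingLeaderboardSet ranked player (climbingLeaderboardSet ranked player)

-- ===== LEMMAS AND PROOFS =====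

-- a list's countP equals j when the predicate holds exactly on the first j positions
theorem countP_eq_of_getElem_iff (l : List Int) (p : Int → Bool) :
    ∀ (j : Nat), j ≤ l.length → (∀ i (hi : i < l.length), p l[i] = true ↔ i < j) →
    l.countP p = j := by
  induction l with
  | nil => intro j hj _; simpa using (Nat.le_zero.mp (by simpa using hj)).symm
  | cons x t ih =>
    intro j hj h
    cases j with
    | zero =>
      have hx : ¬ p x = true := by
        have := h 0 (by simp); simpa using this
      have ht := ih 0 (Nat.zero_le _) (by
        intro i hi
        have h' := h (i + 1) (by simpa using Nat.succ_lt_succ hi)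
        simpa using h')
      simp [hx, ht]
    | succ j' =>
      have hx : p x = true := by
        have := h 0 (by simp); simpa using this
      have ht := ih j' (by simpa using hj) (by
        intro i hi
        have h' := h (i + 1) (by simpa using Nat.succ_lt_succ hi)
        simpa [Nat.succ_lt_succ_iff] using h')
      simp [hx, ht]

-- A's binary-search loop on a (≤)-sorted list computes countP (· < k)
theorem pyBisectLoop_spec (arr : List Int) (k : Int)
    (hp : arr.Pairwise (· ≤ ·)) :
    ∀ (d l r : Nat), r - l = d → l ≤ r → r ≤ arr.length →
    (∀ i (hi : i < arr.length), i < l → arr[i] < k) →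
    (∀ i (hi : i < arr.length), r ≤ i → k ≤ arr[i]) →
    pyBisectLoop arr k l r = arr.countP (fun x => decide (x < k)) := by
  intro d
  induction d using Nat.strong_induction_on with
  | _ d ih =>
    intro l r hd hlr hrlen hlo hhi
    rw [pyBisectLoop]
    by_cases h : l < r
    · rw [dif_pos h]
      have hm1 : l ≤ (l + r) / 2 := by omega
      have hm2 : (l + r) / 2 < r := by omega
      have hmlen : (l + r) / 2 < arr.length := by omega
      have hget : arr.getD ((l + r) / 2) 0 = arr[(l + r) / 2] :=
        List.getD_eq_getElem arr 0 hmlen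
      have hpg := List.pairwise_iff_getElem.mp hp
      by_cases hc : arr[(l + r) / 2] < k
      · simp only [hget, if_pos hc]
        refine ih (r - ((l + r) / 2 + 1)) (by omega) ((l + r) / 2 + 1) r (by omega)
          (by omega) hrlen ?_ hhi
        intro i hi hil
        rcases Nat.lt_or_ge i ((l + r) / 2) with h' | h'
        · exact lt_of_le_of_lt (hpg i _ hi hmlen h') hc
        · have heq : i = (l + r) / 2 := by omega
          subst heq; exact hc
      · simp only [hget, if_neg hc]
        refine ih ((l + r) / 2 - l) (by omega) l ((l + r) / 2) (by omega)
          (by omega) (by omega) hlo ?_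
        intro i hi him
        rcases Nat.lt_or_ge ((l + r) / 2) i with h' | h'
        · exact le_trans (le_of_not_gt hc) (hpg _ i hmlen hi h')
        · have heq : i = (l + r) / 2 := by omega
          subst heq; exact le_of_not_gt hc
    · rw [dif_neg h]
      have hle : l = r := by omega
      refine (countP_eq_of_getElem_iff arr _ l (by omega) ?_).symm
      intro i hi
      constructor
      · intro hpi
        by_contra hil
        have := hhi i hi (by omega)
        simp only [decide_eq_true_eq] at hpi
        omega
      · intro hil
        simpa using hlo i hi hil

-- x < a, x = a, x > a partition a list of Ints
theorem countP_tri (l : List Int) (a : Int) :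
    l.countP (fun x => decide (x < a)) + l.countP (fun x => decide (x = a))
      + l.countP (fun x => decide (a < x)) = l.length := by
  induction l with
  | nil => simp
  | cons x t ih =>
    simp only [List.countP_cons, List.length_cons]
    rcases lt_trichotomy x a with h | h | h <;>
      simp [h, not_lt_of_gt, ne_of_gt, ne_of_lt] <;> omega

-- on a nodup list, countP (· = a) is 1 if a is a member, else 0
theorem countP_eq_one_of_mem (l : List Int) (a : Int) (hnd : l.Nodup) (ha : a ∈ l) :
    l.countP (fun x => decide (x = a)) = 1 := by
  have h : (fun x : Int => decide (x = a)) = (fun x : Int => x == a) := by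
    funext x; by_cases h : x = a <;> simp [h]
  rw [h]
  have hc : l.countP (fun x : Int => x == a) = l.count a := by rw [List.count]
  rw [hc]
  exact List.count_eq_one_of_mem hnd ha

theorem countP_eq_zero_of_not_mem (l : List Int) (a : Int) (ha : a ∉ l) :
    l.countP (fun x => decide (x = a)) = 0 := by
  rw [List.countP_eq_zero]
  intro x hx
  simp only [decide_eq_true_eq]
  intro hxa; exact ha (hxa ▸ hx)

-- per-element agreement of the two rank formulas
theorem elem_rank (ranked : List Int) (a : Int) :
    (if pyBisectLoop (PySem.List.sorted (PySem.Set.ofList ranked) (fun x => x)) a 0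
          (PySem.List.sorted (PySem.Set.ofList ranked) (fun x => x)).length
        < (PySem.List.sorted (PySem.Set.ofList ranked) (fun x => x)).length
        ∧ (PySem.List.sorted (PySem.Set.ofList ranked) (fun x => x)).getD
            (pyBisectLoop (PySem.List.sorted (PySem.Set.ofList ranked) (fun x => x)) a 0
              (PySem.List.sorted (PySem.Set.ofList ranked) (fun x => x)).length) 0 = a
     then ((PySem.List.sorted (PySem.Set.ofList ranked) (fun x => x)).length : Int)
          - pyBisectLoop (PySem.List.sorted (PySem.Set.ofList ranked) (fun x => x)) a 0
              (PySem.List.sorted (PySem.Set.ofList ranked) (fun x => x)).length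
     else ((PySem.List.sorted (PySem.Set.ofList ranked) (fun x => x)).length : Int) + 1
          - pyBisectLoop (PySem.List.sorted (PySem.Set.ofList ranked) (fun x => x)) a 0
              (PySem.List.sorted (PySem.Set.ofList ranked) (fun x => x)).length)
    = 1 + (((PySem.Set.ofList ranked).filter (fun c => decide (a < c))).length : Int) := by
  set C := PySem.List.sorted (PySem.Set.ofList ranked) (fun x => x) with hC
  have hplt : C.Pairwise (· < ·) := PySem.List.sorted_ofList_pairwise_lt ranked
  have hple : C.Pairwise (· ≤ ·) := hplt.imp le_of_lt
  have hperm : C.Perm (PySem.Set.ofList ranked) :=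
    PySem.List.sorted_perm (PySem.Set.ofList ranked) (fun x => x) false
  have hnd : C.Nodup := hplt.imp (fun h => ne_of_lt h)
  have hbis : pyBisectLoop C a 0 C.length = C.countP (fun x => decide (x < a)) :=
    pyBisectLoop_spec C a hple C.length 0 C.length (by omega) (by omega) (le_refl _)
      (by intro i hi h; omega) (by intro i hi h; omega)
  have htri := countP_tri C a
  have hGfil : C.countP (fun x => decide (a < x))
      = ((PySem.Set.ofList ranked).filter (fun c => decide (a < c))).length := by
    rw [hperm.countP_eq, List.countP_eq_length_filter]
  have hcntle : C.countP (fun x => decide (x < a)) ≤ C.length := List.countP_le_length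
  by_cases hmem : a ∈ C
  · -- a occurs: the guard holds and rank is n - i
    obtain ⟨t, ht, hta⟩ := List.mem_iff_getElem.mp hmem
    have hpg := List.pairwise_iff_getElem.mp hplt
    have hit : C.countP (fun x => decide (x < a)) = t := by
      refine countP_eq_of_getElem_iff C _ t (by omega) ?_
      intro i hi
      constructor
      · intro hpi
        by_contra hts
        simp only [decide_eq_true_eq] at hpi
        rcases Nat.lt_or_ge t i with h' | h'
        · have := hpg t i ht hi h'
          omega
        · have heq : i = t := by omega
          subst heq; omega
      · intro hil
        have := hpg i t hi ht hil
        simp only [decide_eq_true_eq]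
        omega
    have hE := countP_eq_one_of_mem C a hnd hmem
    rw [hbis, hit]
    have hguard : t < C.length ∧ C.getD t 0 = a := ⟨ht, by rw [List.getD_eq_getElem C 0 ht]; exact hta⟩
    rw [if_pos hguard, ← hGfil]
    rw [hit] at htri
    omega
  · -- a absent: the guard fails and rank is n + 1 - i
    have hE := countP_eq_zero_of_not_mem C a hmem
    rw [hbis]
    have hguard : ¬ (C.countP (fun x => decide (x < a)) < C.length
        ∧ C.getD (C.countP (fun x => decide (x < a))) 0 = a) := by
      rintro ⟨h1, h2⟩
      rw [List.getD_eq_getElem C 0 h1] at h2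
      exact hmem (h2 ▸ List.getElem_mem h1)
    rw [if_neg hguard, ← hGfil]
    omega

-- ===== VERDICT (by name: the statement is the Claim_ definition above) =====
theorem climbingLeaderboardSet_spec : Claim_equal_climbingLeaderboardSet := by
  intro ranked player _
  unfold Spec_climbingLeaderboardSet climbingLeaderboardSet climbingLeaderboardSet_alt
  simp only []
  have hfun : (fun (res : List Int) (a : Int) =>
      if pyBisectLoop (PySem.List.sorted (PySem.Set.ofList ranked) (fun x => x)) a 0
            (PySem.List.sorted (PySem.Set.ofList ranked) (fun x => x)).length
          < (PySem.List.sorted (PySem.Set.ofList ranked) (fun x => x)).length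
          ∧ (PySem.List.sorted (PySem.Set.ofList ranked) (fun x => x)).getD
              (pyBisectLoop (PySem.List.sorted (PySem.Set.ofList ranked) (fun x => x)) a 0
                (PySem.List.sorted (PySem.Set.ofList ranked) (fun x => x)).length) 0 = a
       then res ++ [((PySem.List.sorted (PySem.Set.ofList ranked) (fun x => x)).length : Int)
            - pyBisectLoop (PySem.List.sorted (PySem.Set.ofList ranked) (fun x => x)) a 0
                (PySem.List.sorted (PySem.Set.ofList ranked) (fun x => x)).length]
       else res ++ [((PySem.List.sorted (PySem.Set.ofList ranked) (fun x => x)).length : Int) + 1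
            - pyBisectLoop (PySem.List.sorted (PySem.Set.ofList ranked) (fun x => x)) a 0
                (PySem.List.sorted (PySem.Set.ofList ranked) (fun x => x)).length])
      = fun res a => res ++ [1 + (((PySem.Set.ofList ranked).filter (fun c => decide (a < c))).length : Int)] := by
    funext res a
    rw [← elem_rank ranked a]
    split <;> rfl
  rw [hfun, PySem.List.foldl_append_singleton_eq_map]
  simp
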